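-- pv_equiv track=rewrite | github.com/kunpark04/intra | tasks/_poll_eval_nbs.py | current_nb
-- ===== SOURCE A (Python) =====
-- def current_nb(tail):
--     """Heuristic: which of the 6 notebooks is currently executing."""
--     nbs = [
--         "s1_individual_net",
--         "s2_combined_net",
--         "s3_mc_combined_net",
--         "s4_individual_ml2_net",
--         "s5_combined_ml2_net",
--         "s6_mc_combined_ml2_net",
--     ]
--     latest = None
--     for line in tail.splitlines():
--         for nb in nbs:
--             if nb in line:
--                 latest = nb
--     return latest or "?"
-- ===== SOURCE B (Python) =====
-- def current_nb(tail):
--     """Heuristic: which of the 6 notebooks is currently executing."""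
--     nbs = [
--         "s1_individual_net",
--         "s2_combined_net",
--         "s3_mc_combined_net",
--         "s4_individual_ml2_net",
--         "s5_combined_ml2_net",
--         "s6_mc_combined_ml2_net",
--     ]
--     for line in reversed(tail.splitlines()):
--         for nb in reversed(nbs):
--             if nb in line:
--                 return nb
--     return "?"
-- ===== Notes on version B (the rewrite author's own statement) =====
-- stated objective: alternative
-- what changed: Replaces the forward full scan with last-match overwriting by a reversed scan over lines (and over the notebook list) that returns at the first hit, so trailing matches short-circuit instead of every line being examined.
import Mathlib
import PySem

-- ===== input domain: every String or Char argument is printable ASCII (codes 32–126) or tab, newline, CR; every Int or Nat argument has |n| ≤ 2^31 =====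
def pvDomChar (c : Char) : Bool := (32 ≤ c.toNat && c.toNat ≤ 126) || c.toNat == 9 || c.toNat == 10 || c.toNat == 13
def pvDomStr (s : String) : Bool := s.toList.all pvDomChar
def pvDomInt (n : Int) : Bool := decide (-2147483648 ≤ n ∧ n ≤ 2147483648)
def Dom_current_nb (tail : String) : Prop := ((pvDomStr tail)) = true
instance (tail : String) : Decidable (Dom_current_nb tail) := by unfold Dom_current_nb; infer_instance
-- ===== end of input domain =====

-- B replaces A's forward full scan (overwriting `latest`) by a reversed scan with early exit; same return value.

-- the shared notebook-name list
def pvNbs : List String :=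
  [ "s1_individual_net", "s2_combined_net", "s3_mc_combined_net",
    "s4_individual_ml2_net", "s5_combined_ml2_net", "s6_mc_combined_ml2_net" ]

-- ===== PORT A =====
-- forward fold over lines; inner fold over nbs overwrites `latest` on each match
def current_nb (tail : String) : String :=
  let latest : Option String :=
    (PySem.Str.splitlines tail).foldl
      (fun latest line =>
        pvNbs.foldl (fun acc nb => if PySem.Str.isIn nb line then some nb else acc) latest)
      none
  latest.getD "?"

-- ===== PORT B =====
-- first nb of reversed(nbs) contained in line (Source B's inner loop with early return)
def pvLastNb (line : String) : Option String :=
  pvNbs.reverse.find? (fun nb => PySem.Str.isIn nb line)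

-- Source B's outer loop: over reversed lines, returning at the first hit
def pvGoB : List String → String
  | [] => "?"
  | l :: rest =>
    match pvLastNb l with
    | some nb => nb
    | none => pvGoB rest

def current_nb_alt (tail : String) : String :=
  pvGoB (PySem.Str.splitlines tail).reverse

-- ===== PRECONDITION & SPEC =====
def Spec_current_nb (tail : String) (out : String) : Prop := out = current_nb_alt tail
instance (tail : String) (out : String) : Decidable (Spec_current_nb tail out) := by unfold Spec_current_nb; infer_instance

-- ===== CLAIM (what is proved, stated in full; the proofs are below) =====
def Claim_equal_current_nb : Prop := ∀ (tail : String), Dom_current_nb tail → Spec_current_nb tail (current_nb tail)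

-- ===== LEMMAS AND PROOFS =====

-- proof-side Option version of pvGoB
def pvHB : List String → Option String
  | [] => none
  | l :: rest =>
    match pvLastNb l with
    | some nb => some nb
    | none => pvHB rest

theorem pvGoB_eq_hB (ls : List String) : pvGoB ls = (pvHB ls).getD "?" := by
  induction ls with
  | nil => rfl
  | cons l rest ih =>
    simp only [pvGoB, pvHB]
    cases pvLastNb l with
    | some nb => rfl
    | none => exact ih

theorem pvHB_append (xs ys : List String) :
    pvHB (xs ++ ys) = match pvHB xs with | some nb => some nb | none => pvHB ys := by
  induction xs with
  | nil => rfl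
  | cons l rest ih =>
    simp only [List.cons_append, pvHB]
    cases pvLastNb l with
    | some nb => rfl
    | none => exact ih

-- inner overwrite fold over a nb list = first match of its reverse, else the accumulator
theorem pvInner_eq (l : List String) (line : String) (acc : Option String) :
    l.foldl (fun acc nb => if PySem.Str.isIn nb line then some nb else acc) acc
      = match l.reverse.find? (fun nb => PySem.Str.isIn nb line) with
        | some nb => some nb
        | none => acc := by
  induction l generalizing acc with
  | nil => rfl
  | cons x xs ih =>
    simp only [List.foldl_cons, List.reverse_cons, List.find?_append, ih]
    cases h : xs.reverse.find? (fun nb => PySem.Str.isIn nb line) with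
    | some y => rfl
    | none =>
      simp only [List.find?, PySem.Str.isIn_eq, Option.none_or]
      rcases Bool.eq_false_or_eq_true (PySem.Chars.isIn x.toList line.toList) with hx | hx <;>
        simp [hx]

-- outer overwrite fold = reversed early-exit scan, else the accumulator
theorem pvOuter_eq (ls : List String) (acc : Option String) :
    ls.foldl
      (fun latest line =>
        pvNbs.foldl (fun acc nb => if PySem.Str.isIn nb line then some nb else acc) latest) acc
      = match pvHB ls.reverse with | some nb => some nb | none => acc := by
  induction ls generalizing acc with
  | nil => rfl
  | cons l rest ih =>
    simp only [List.foldl_cons, List.reverse_cons, ih, pvHB_append]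
    cases h : pvHB rest.reverse with
    | some y => rfl
    | none =>
      simp only [pvHB, pvInner_eq, pvLastNb]
      cases pvNbs.reverse.find? (fun nb => PySem.Str.isIn nb l) <;> rfl

-- ===== VERDICT (by name: the statement is the Claim_ definition above) =====
theorem current_nb_spec : Claim_equal_current_nb := by
  intro tail _
  unfold Spec_current_nb current_nb current_nb_alt
  rw [pvGoB_eq_hB, pvOuter_eq]
  cases pvHB (PySem.Str.splitlines tail).reverse <;> rfl
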